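-- pv_equiv track=rewrite | github.com/aelmekeev/year-on-facade | utils/build.py | choose_point
-- ===== SOURCE A (Python) =====
-- def choose_point(points, prioritize_world=False):
--     chosen_point = points[0]
--     for point in points:
--         # return first non-UK point
--         if prioritize_world and point["country"] != "UK":
--             chosen_point = point
--             break
--         # return first visited external point
--         elif "external" in point and point["notes"] != "TODO":
--             chosen_point = point
--             break
--         # prefer visited
--         elif point["notes"] != "TODO" and chosen_point["notes"] == "TODO":
--             chosen_point = point
--         # prefer external
--         elif "external" in point and "external" not in chosen_point:
--             chosen_point = point
--     del chosen_point["country"]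
--     return chosen_point
-- ===== SOURCE B (Python) =====
-- def choose_point(points, prioritize_world=False):
--     # Two passes instead of one fused loop. Pass 1: find the first "break" point.
--     # Pass 2 (only if none): fold the prefer-visited / prefer-external rules.
--     # Like A, this deletes "country" from (and returns) the chosen dict object itself.
--     chosen = next((p for p in points
--                    if (prioritize_world and p["country"] != "UK")
--                    or ("external" in p and p["notes"] != "TODO")), None)
--     if chosen is None:
--         chosen = points[0]
--         for p in points:
--             if p["notes"] != "TODO" and chosen["notes"] == "TODO":
--                 chosen = p
--             elif "external" in p and "external" not in chosen:
--                 chosen = p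
--     del chosen["country"]
--     return chosen
-- ===== Notes on version B (the rewrite author's own statement) =====
-- stated objective: alternative
-- what changed: Replaces A's single fused loop (break conditions interleaved with the two preference updates) by two separate passes: a find-first scan for the break conditions, and only if none fires, a fold applying the prefer-visited/prefer-external rules.
import Mathlib
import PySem

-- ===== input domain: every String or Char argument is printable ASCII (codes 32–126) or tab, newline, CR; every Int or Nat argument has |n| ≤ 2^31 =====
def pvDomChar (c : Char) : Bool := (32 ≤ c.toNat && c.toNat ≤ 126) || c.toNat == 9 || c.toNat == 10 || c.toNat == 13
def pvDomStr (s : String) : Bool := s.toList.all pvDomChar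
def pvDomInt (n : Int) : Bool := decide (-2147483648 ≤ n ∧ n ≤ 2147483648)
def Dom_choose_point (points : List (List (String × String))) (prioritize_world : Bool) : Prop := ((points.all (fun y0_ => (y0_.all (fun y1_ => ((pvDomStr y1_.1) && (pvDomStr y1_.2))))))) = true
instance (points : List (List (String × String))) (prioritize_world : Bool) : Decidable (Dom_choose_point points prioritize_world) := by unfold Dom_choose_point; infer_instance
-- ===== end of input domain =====

-- B selects the chosen point in two passes (find-first break scan, then a preference fold)
-- instead of A's one fused loop; equivalence is about the RETURN value only — both Python
-- versions mutate (del "country" from) the returned dict object itself, identically.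

-- ===== PORT A =====
-- dicts are association lists: first-match lookup, del removes the first matching pair
def pvGetA (p : List (String × String)) (k : String) : String :=
  match p with
  | [] => ""            -- unreachable under Pre_ (KeyError in Python)
  | (k', v) :: r => if k' == k then v else pvGetA r k

def pvHasA (p : List (String × String)) (k : String) : Bool :=
  match p with
  | [] => false
  | (k', _) :: r => if k' == k then true else pvHasA r k

def pvDelA (p : List (String × String)) (k : String) : List (String × String) :=
  match p with
  | [] => []            -- unreachable under Pre_ (KeyError in Python)
  | (k', v) :: r => if k' == k then r else (k', v) :: pvDelA r k

def chooseLoopA (pw : Bool) (chosen : List (String × String)) :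
    List (List (String × String)) → List (String × String)
  | [] => chosen
  | p :: ps =>
    if pw && (pvGetA p "country" != "UK") then p
    else if pvHasA p "external" && (pvGetA p "notes" != "TODO") then p
    else if (pvGetA p "notes" != "TODO") && (pvGetA chosen "notes" == "TODO") then
      chooseLoopA pw p ps
    else if pvHasA p "external" && !pvHasA chosen "external" then
      chooseLoopA pw p ps
    else chooseLoopA pw chosen ps

def choose_point (points : List (List (String × String))) (prioritize_world : Bool) : List (String × String) :=
  pvDelA (chooseLoopA prioritize_world (points.headD []) points) "country"

-- ===== PORT B =====
def pvBreakB (pw : Bool) (p : List (String × String)) : Bool :=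
  (pw && (pvGetA p "country" != "UK")) || (pvHasA p "external" && (pvGetA p "notes" != "TODO"))

def pvStepB (chosen p : List (String × String)) : List (String × String) :=
  if (pvGetA p "notes" != "TODO") && (pvGetA chosen "notes" == "TODO") then p
  else if pvHasA p "external" && !pvHasA chosen "external" then p
  else chosen

def choose_point_alt (points : List (List (String × String))) (prioritize_world : Bool) : List (String × String) :=
  match points.find? (fun p => pvBreakB prioritize_world p) with
  | some p => pvDelA p "country"
  | none =>
    match points with
    | [] => []          -- unreachable under Pre_ (IndexError in Python)
    | p0 :: _ => pvDelA (points.foldl pvStepB p0) "country"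

-- ===== PRECONDITION & SPEC =====
-- Pre_-side helpers (closed-form reads on the input; no copy of either port's loop).
def pvB1P (pw : Bool) (p : List (String × String)) : Bool :=
  pw && ((List.lookup "country" p).elim false (fun c => c != "UK"))
def pvBrkP (pw : Bool) (p : List (String × String)) : Bool :=
  pvB1P pw p || ((List.lookup "external" p).isSome && ((List.lookup "notes" p).elim false (fun n => n != "TODO")))
def pvNoRaiseP (pw : Bool) (p : List (String × String)) : Bool :=
  (!pw || (List.lookup "country" p).isSome) && (pvB1P pw p || (List.lookup "notes" p).isSome)
def pvStopP (pw : Bool) (p : List (String × String)) : Bool :=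
  pvBrkP pw p || !pvNoRaiseP pw p
def pvVisP (p : List (String × String)) : Bool :=
  (List.lookup "notes" p).elim false (fun n => n != "TODO")
-- In the no-break case A's preference fold flips between visited and external points, so the
-- surviving point is the first element of the last same-type run among the non-plain points.
def pvFinalP (points : List (List (String × String))) : List (String × String) :=
  let s := points.filter (fun p => pvVisP p || (List.lookup "external" p).isSome)
  match s.getLast? with
  | none => points.headD []
  | some l => ((s.reverse.takeWhile (fun p => pvVisP p == pvVisP l)).getLast?).getD []

-- Pre_ = exactly the inputs on which the Python A returns: nonempty, no duplicate keys per
-- point (a Python dict cannot hold them), and either the scan stops at a point where a break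
-- condition fires (not a KeyError) and that point carries "country" for the final del, or it
-- never stops and the point the preference fold ends on carries "country".
def Pre_choose_point (points : List (List (String × String))) (prioritize_world : Bool) : Prop :=
  points ≠ [] ∧ (∀ p ∈ points, (p.map Prod.fst).Nodup) ∧
  (∀ p ∈ points, points.find? (pvStopP prioritize_world) = some p →
      pvBrkP prioritize_world p = true ∧ (List.lookup "country" p).isSome = true) ∧
  (points.find? (pvStopP prioritize_world) = none →
      (List.lookup "country" (pvFinalP points)).isSome = true)
instance (points : List (List (String × String))) (prioritize_world : Bool) : Decidable (Pre_choose_point points prioritize_world) := by unfold Pre_choose_point; infer_instance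

def pvWitness_choose_point : (List (List (String × String))) × Bool :=
  ([[("country", "UK"), ("notes", "TODO")]], false)

def Spec_choose_point (points : List (List (String × String))) (prioritize_world : Bool) (out : List (String × String)) : Prop := out = choose_point_alt points prioritize_world
instance (points : List (List (String × String))) (prioritize_world : Bool) (out : List (String × String)) : Decidable (Spec_choose_point points prioritize_world out) := by unfold Spec_choose_point; infer_instance

-- ===== CLAIM (what is proved, stated in full; the proofs are below) =====
def Claim_equal_choose_point : Prop := ∀ (points : List (List (String × String))) (prioritize_world : Bool), Dom_choose_point points prioritize_world → Pre_choose_point points prioritize_world → Spec_choose_point points prioritize_world (choose_point points prioritize_world)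

-- ===== LEMMAS AND PROOFS =====
-- A's fused loop = B's two passes, for any running `chosen`.
theorem chooseLoopA_eq (pw : Bool) (ps : List (List (String × String)))
    (chosen : List (String × String)) :
    chooseLoopA pw chosen ps =
      match ps.find? (fun p => pvBreakB pw p) with
      | some p => p
      | none => ps.foldl pvStepB chosen := by
  induction ps generalizing chosen with
  | nil => rfl
  | cons p ps ih =>
    simp only [chooseLoopA, List.find?_cons, List.foldl_cons]
    by_cases h1 : (pw && (pvGetA p "country" != "UK")) = true
    · simp [pvBreakB, h1]
    · by_cases h2 : (pvHasA p "external" && (pvGetA p "notes" != "TODO")) = true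
      · simp [pvBreakB, h1, h2]
      · have hb : pvBreakB pw p = false := by simp [pvBreakB, h1, h2]
        simp only [h1, h2, if_neg, hb, Bool.false_eq_true, ite_false]
        by_cases h3 : ((pvGetA p "notes" != "TODO") && (pvGetA chosen "notes" == "TODO")) = true
        · simp [h3, ih, pvStepB]
        · by_cases h4 : (pvHasA p "external" && !pvHasA chosen "external") = true
          · simp [h3, h4, ih, pvStepB]
          · simp [h3, h4, ih, pvStepB]

-- ===== VERDICT (by name: the statement is the Claim_ definition above) =====
theorem choose_point_spec : Claim_equal_choose_point := by
  intro points pw _ hpre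
  obtain ⟨hne, -⟩ := hpre
  obtain ⟨p0, rest, rfl⟩ := List.exists_cons_of_ne_nil hne
  unfold Spec_choose_point choose_point choose_point_alt
  rw [chooseLoopA_eq]
  cases h : (p0 :: rest).find? (fun p => pvBreakB pw p) <;> simp [h]
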